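-- pv_equiv track=rewrite | github.com/learnore/helloshen | z_huawei_od/24_od/python/100/51.py | solution
-- ===== SOURCE A (Python) =====
-- def solution(input_str):
--     """
--     解决方案：000 替换为2，表示010中间可以落座1个人
--     00 不可落座                1 2 0
--     000     0000    可落座1人  3 4 1
--     00000   000000  可落座2人  5 6 2
--     0000000 00000000 可落座3人 7 8 3
--     """
--     temp_list = []      # 存储每个间隔0的个数
--     count = 0
--     for i in input_str:
--         if i == "0":
--             count += 1
--         elif count != 0:
--             temp_list.append(count)
--             count = 0
--
--     result = 0
--     for i in temp_list:
--         if i == 1 or i == 2: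
--             continue
--
--         if i % 2 == 0:      # 偶数
--             result += (i // 2 - 1)
--         else:
--             result += (i-1)//2
--
--     return result
-- ===== SOURCE B (Python) =====
-- def solution(input_str):
--     result = 0
--     count = 0
--     for ch in input_str:
--         if ch == "0":
--             count += 1
--         else:
--             if count > 0:
--                 result += (count - 1) // 2
--             count = 0
--     return result
-- ===== Notes on version B (the rewrite author's own statement) =====
-- stated objective: simpler
-- what changed: Single pass with a running zero-count and accumulator using the uniform formula (count-1)//2, eliminating A's intermediate temp_list and its second loop's three-way branch.
import Mathlib
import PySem

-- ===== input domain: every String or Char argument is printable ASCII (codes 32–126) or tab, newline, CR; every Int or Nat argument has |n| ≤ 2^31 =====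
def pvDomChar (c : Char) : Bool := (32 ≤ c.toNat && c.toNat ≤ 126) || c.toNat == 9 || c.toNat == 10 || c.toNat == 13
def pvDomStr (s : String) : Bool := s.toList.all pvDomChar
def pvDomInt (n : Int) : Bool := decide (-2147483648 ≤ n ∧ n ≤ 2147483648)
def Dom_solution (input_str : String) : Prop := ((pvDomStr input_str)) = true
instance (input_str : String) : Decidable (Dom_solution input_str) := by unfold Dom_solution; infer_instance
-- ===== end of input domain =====

-- B replaces A's two passes (collect run lengths, then sum per-run seats) by one pass with a
-- running zero-count and accumulator using the uniform formula (count-1)//2; same O(n) cost.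
-- ===== PORT A =====
-- first loop of A: builds the list of zero-run lengths (trailing run never flushed)
def solutionLoop1 (cs : List Char) (tempList : List Int) (count : Int) : List Int × Int :=
  match cs with
  | [] => (tempList, count)
  | c :: rest =>
    if c = '0' then solutionLoop1 rest tempList (count + 1)
    else if count ≠ 0 then solutionLoop1 rest (tempList ++ [count]) 0
    else solutionLoop1 rest tempList count

-- second loop of A: sums seats over the run lengths
def solutionLoop2 (tempList : List Int) (result : Int) : Int :=
  match tempList with
  | [] => result
  | i :: rest =>
    if i = 1 ∨ i = 2 then solutionLoop2 rest result
    else if PySem.Int.mod i 2 = 0 then solutionLoop2 rest (result + (PySem.Int.floordiv i 2 - 1))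
    else solutionLoop2 rest (result + PySem.Int.floordiv (i - 1) 2)

def solution (input_str : String) : Int :=
  solutionLoop2 (solutionLoop1 input_str.toList [] 0).1 0

-- ===== PORT B =====
-- B: one pass, running zero-count, accumulator; flush (count-1)//2 at each non-'0'
def solutionAltLoop (cs : List Char) (count result : Int) : Int :=
  match cs with
  | [] => result
  | c :: rest =>
    if c = '0' then solutionAltLoop rest (count + 1) result
    else solutionAltLoop rest 0 (if 0 < count then result + PySem.Int.floordiv (count - 1) 2 else result)

def solution_alt (input_str : String) : Int := solutionAltLoop input_str.toList 0 0

-- ===== PRECONDITION & SPEC =====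
def Spec_solution (input_str : String) (out : Int) : Prop := out = solution_alt input_str
instance (input_str : String) (out : Int) : Decidable (Spec_solution input_str out) := by unfold Spec_solution; infer_instance

-- ===== CLAIM (what is proved, stated in full; the proofs are below) =====
def Claim_equal_solution : Prop := ∀ (input_str : String), Dom_solution input_str → Spec_solution input_str (solution input_str)

-- ===== LEMMAS AND PROOFS =====

theorem solutionLoop2_shift (tempList : List Int) (r : Int) :
    solutionLoop2 tempList r = r + solutionLoop2 tempList 0 := by
  induction tempList generalizing r with
  | nil => simp [solutionLoop2]
  | cons i rest ih =>
    simp only [solutionLoop2]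
    split_ifs <;> rw [ih] <;> rw [ih (0 + _)] <;> ring

theorem solutionAltLoop_shift (cs : List Char) (c r : Int) :
    solutionAltLoop cs c r = r + solutionAltLoop cs c 0 := by
  induction cs generalizing c r with
  | nil => simp [solutionAltLoop]
  | cons x rest ih =>
    simp only [solutionAltLoop]
    split_ifs <;> (conv_lhs => rw [ih]) <;> (try conv_rhs => rw [ih]) <;> try ring

-- A's per-run formula collapses to (i-1)//2 for i >= 1
theorem formula_eq (i : Int) (hi : 1 <= i) :
    solutionLoop2 [i] 0 = PySem.Int.floordiv (i - 1) 2 := by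
  simp only [solutionLoop2]
  rw [PySem.Int.floordiv_eq_ediv_of_pos (b := 2) (by omega),
    PySem.Int.mod_eq_emod_of_pos (b := 2) (by omega)]
  split_ifs with h1 h2
  · rcases h1 with h | h <;> subst h <;> decide
  · rw [PySem.Int.floordiv_eq_ediv_of_pos (by omega)]; omega
  · rw [PySem.Int.floordiv_eq_ediv_of_pos (by omega)]; omega

theorem solutionLoop2_concat (xs ys : List Int) (r : Int) :
    solutionLoop2 (xs ++ ys) r = solutionLoop2 ys (solutionLoop2 xs r) := by
  induction xs generalizing r with
  | nil => simp [solutionLoop2]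
  | cons j rest ih =>
    simp only [List.cons_append, solutionLoop2]
    split_ifs <;> exact ih _

theorem solutionLoop2_append (tempList : List Int) (i : Int) :
    solutionLoop2 (tempList ++ [i]) 0 = solutionLoop2 tempList 0 + solutionLoop2 [i] 0 := by
  rw [solutionLoop2_concat, solutionLoop2_shift [i]]

theorem main_inv (cs : List Char) (tempList : List Int) (count : Int) (hc : 0 <= count) :
    solutionLoop2 (solutionLoop1 cs tempList count).1 0
      = solutionLoop2 tempList 0 + solutionAltLoop cs count 0 := by
  induction cs generalizing tempList count with
  | nil => simp [solutionLoop1, solutionAltLoop]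
  | cons c rest ih =>
    simp only [solutionLoop1, solutionAltLoop]
    by_cases h0 : c = '0'
    · simp only [h0, if_pos]
      exact ih _ _ (by omega)
    · simp only [if_neg h0]
      by_cases hz : count ≠ 0
      · simp only [if_pos hz, if_pos (show 0 < count by omega)]
        rw [ih _ _ le_rfl, solutionLoop2_append, formula_eq count (by omega),
          solutionAltLoop_shift rest 0 (0 + _)]
        ring
      · have h0c : count = 0 := by omega
        subst h0c
        simp only [if_neg hz, if_neg (show ¬ (0:Int) < 0 by omega)]
        exact ih _ _ le_rfl

-- ===== VERDICT (by name: the statement is the Claim_ definition above) =====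
theorem solution_spec : Claim_equal_solution := by
  intro s _
  unfold Spec_solution solution solution_alt
  rw [main_inv s.toList [] 0 le_rfl]
  simp [solutionLoop2]
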